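-- pv_equiv track=rewrite | github.com/reedwi/advent-of-code-2023 | 14/14.py | run_cyle
-- ===== SOURCE A (Python) =====
-- def run_cyle(seq):
--     seq_split = seq.split('#')
--     new_seq = []
--     for block in seq_split:
--         char_count = block.count('O')
--         block = 'O' * char_count + block.replace('O', '')
--         new_seq.append(block)
--
--     new_seq_str = '#'.join(new_seq)
--     return new_seq_str
-- ===== SOURCE B (Python) =====
-- def run_cyle(seq):
--     out = []
--     count = 0
--     buf = []
--     for ch in seq:
--         if ch == '#':
--             out.append('O' * count + ''.join(buf) + '#')
--             count = 0
--             buf = []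
--         elif ch == 'O':
--             count += 1
--         else:
--             buf.append(ch)
--     out.append('O' * count + ''.join(buf))
--     return ''.join(out)
-- ===== Notes on version B (the rewrite author's own statement) =====
-- stated objective: alternative
-- what changed: Replaces the split/count/replace/join pipeline with a single streaming pass over seq that keeps a rock count and a buffer of other characters per block, flushing at each separator and once at the end.
import Mathlib
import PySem

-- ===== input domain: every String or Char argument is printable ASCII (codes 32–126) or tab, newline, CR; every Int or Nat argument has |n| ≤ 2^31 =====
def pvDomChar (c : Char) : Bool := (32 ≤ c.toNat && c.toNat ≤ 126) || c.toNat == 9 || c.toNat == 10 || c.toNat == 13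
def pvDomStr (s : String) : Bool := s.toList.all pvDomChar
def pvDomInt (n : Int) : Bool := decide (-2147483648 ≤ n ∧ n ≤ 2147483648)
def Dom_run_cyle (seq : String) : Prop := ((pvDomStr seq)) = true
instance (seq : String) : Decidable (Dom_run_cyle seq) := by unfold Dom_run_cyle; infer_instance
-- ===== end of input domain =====

-- B replaces A's split('#')/count/replace/join pipeline with one streaming pass (alternative decomposition, same cost).

-- ===== PORT A =====
def run_cyle (seq : String) : String :=
  let seq_split := PySem.Chars.splitOn seq.toList ['#']
  let new_seq := seq_split.foldl (fun acc block =>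
    let char_count := PySem.Chars.count block ['O']
    let block := List.replicate char_count 'O' ++ PySem.Chars.replace block ['O'] []
    acc ++ [block]) []
  String.ofList (PySem.Chars.join ['#'] new_seq)

-- ===== PORT B =====
-- one pass: cnt = 'O's of the current block, buf = its other chars; flush at '#' and at the end
def runBgo : List Char → Nat → List Char → List Char
  | [], cnt, buf => List.replicate cnt 'O' ++ buf
  | c :: rest, cnt, buf =>
    if c = '#' then List.replicate cnt 'O' ++ buf ++ '#' :: runBgo rest 0 []
    else if c = 'O' then runBgo rest (cnt + 1) buf
    else runBgo rest cnt (buf ++ [c])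

def run_cyle_alt (seq : String) : String := String.ofList (runBgo seq.toList 0 [])

-- ===== PRECONDITION & SPEC =====
def Spec_run_cyle (seq : String) (out : String) : Prop := out = run_cyle_alt seq
instance (seq : String) (out : String) : Decidable (Spec_run_cyle seq out) := by unfold Spec_run_cyle; infer_instance

-- ===== CLAIM (what is proved, stated in full; the proofs are below) =====
def Claim_equal_run_cyle : Prop := ∀ (seq : String), Dom_run_cyle seq → Spec_run_cyle seq (run_cyle seq)

-- ===== LEMMAS AND PROOFS =====

-- structural specification of splitOn on the single-char separator '#'
def spl : List Char → List (List Char)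
  | [] => [[]]
  | c :: t => if c = '#' then [] :: spl t else (spl t).modifyHead (c :: ·)

theorem spl_ne_nil (l : List Char) : spl l ≠ [] := by
  induction l with
  | nil => simp [spl]
  | cons c t ih =>
    simp only [spl]
    split_ifs
    · simp
    · cases h : spl t with
      | nil => exact absurd h ih
      | cons b bs => simp [List.modifyHead]

-- A's per-block transform
def fblk (b : List Char) : List Char :=
  List.replicate (b.count 'O') 'O' ++ b.filter (fun c => c != 'O')

theorem count_go_spec (l : List Char) : ∀ (fuel : Nat) (acc : Nat), l.length ≤ fuel →
    PySem.Chars.count.go ['O'] fuel l acc = acc + l.count 'O' := by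
  induction l with
  | nil => intro fuel acc _; cases fuel <;> simp [PySem.Chars.count.go]
  | cons c t ih =>
    intro fuel acc h
    cases fuel with
    | zero => simp at h
    | succ f =>
      simp only [PySem.Chars.count.go, List.isPrefixOf, Bool.and_true, List.length_nil,
        Nat.zero_add, List.drop_succ_cons, List.drop_zero, List.length_cons] at *
      by_cases hc : 'O' = c
      · subst hc
        simp only [BEq.rfl, if_true]
        rw [ih f (acc + 1) (by omega)]
        simp only [List.count_cons, BEq.rfl, if_true]
        omega
      · have hbc : ('O' == c) = true ↔ False := by simp [hc]
        simp only [hbc, if_false]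
        rw [ih f acc (by omega)]
        simp [List.count_cons, Ne.symm hc]
  
theorem count_spec (b : List Char) : PySem.Chars.count b ['O'] = b.count 'O' := by
  simp [PySem.Chars.count, count_go_spec b b.length 0 le_rfl]

theorem replace_go_spec (l : List Char) : ∀ (fuel : Nat) (acc : List Char), l.length ≤ fuel →
    PySem.Chars.replace.go ['O'] [] fuel l acc = acc.reverse ++ l.filter (fun c => c != 'O') := by
  induction l with
  | nil => intro fuel acc _; cases fuel <;> simp [PySem.Chars.replace.go]
  | cons c t ih =>
    intro fuel acc h
    cases fuel with
    | zero => simp at h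
    | succ f =>
      simp only [PySem.Chars.replace.go, List.length_cons] at *
      by_cases hc : 'O' = c
      · subst hc
        simp only [List.isPrefixOf, BEq.rfl, Bool.true_and, if_true, List.length_nil, Nat.zero_add, List.drop_succ_cons,
          List.drop_zero, List.reverse_nil, List.nil_append]
        rw [ih f acc (by omega)]
        simp
      · have : List.isPrefixOf ['O'] (c :: t) = false := by
          simp [List.isPrefixOf, hc]
        rw [this]
        simp only [Bool.false_eq_true, if_false]
        rw [ih f (c :: acc) (by omega)]
        simp [Ne.symm hc]

theorem replace_spec (b : List Char) : PySem.Chars.replace b ['O'] [] = b.filter (fun c => c != 'O') := by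
  simp [PySem.Chars.replace, replace_go_spec b b.length [] (le_refl _)]

theorem splitOn_go_spec (l : List Char) : ∀ (fuel : Nat) (cur acc : List Char) (accl : List (List Char)),
    l.length ≤ fuel →
    PySem.Chars.splitOn.go ['#'] fuel l cur accl =
      accl.reverse ++ (spl l).modifyHead (cur.reverse ++ ·) := by
  induction l with
  | nil =>
    intro fuel cur acc accl _
    cases fuel <;> simp [PySem.Chars.splitOn.go, spl, List.modifyHead]
  | cons c t ih =>
    intro fuel cur acc accl h
    cases fuel with
    | zero => simp at h
    | succ f =>
      simp only [PySem.Chars.splitOn.go, List.length_cons] at *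
      by_cases hc : c = '#'
      · subst hc
        have hp : List.isPrefixOf ['#'] ('#' :: t) = true := by
          simp [List.isPrefixOf]
        rw [hp]
        simp only [if_true]
        simp only [List.length_nil, Nat.zero_add, List.drop_succ_cons, List.drop_zero]
        rw [ih f [] acc (cur.reverse :: accl) (by omega)]
        cases hs : spl t with
        | nil => exact absurd hs (spl_ne_nil t)
        | cons b bs => simp [spl, hs, List.modifyHead]
      · have hp : List.isPrefixOf ['#'] (c :: t) = false := by
          simp [List.isPrefixOf]
          exact fun hb => absurd hb.symm hc
        rw [hp]
        simp only [Bool.false_eq_true, if_false]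
        rw [ih f (c :: cur) acc accl (by omega)]
        cases hs : spl t with
        | nil => exact absurd hs (spl_ne_nil t)
        | cons b bs => simp [spl, hs, hc, List.modifyHead]

theorem splitOn_spec (cs : List Char) : PySem.Chars.splitOn cs ['#'] = spl cs := by
  rw [PySem.Chars.splitOn, splitOn_go_spec cs (cs.length + 1) [] [] [] (by omega)]
  cases hs : spl cs with
  | nil => exact absurd hs (spl_ne_nil cs)
  | cons b bs => simp [List.modifyHead]

-- join sep (x :: l) pulls the head out in front of join sep ([] :: l)
theorem join_head_out (sep x : List Char) (l : List (List Char)) :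
    PySem.Chars.join sep (x :: l) = x ++ PySem.Chars.join sep ([] :: l) := by
  cases l with
  | nil => simp [PySem.Chars.join_singleton]
  | cons y ys => rw [PySem.Chars.join_cons_cons, PySem.Chars.join_cons_cons]; simp

-- main invariant of B's streaming pass
theorem runBgo_spec (cs : List Char) : ∀ (cnt : Nat) (buf : List Char) (b : List Char)
    (bs : List (List Char)), spl cs = b :: bs →
    runBgo cs cnt buf = List.replicate (cnt + b.count 'O') 'O' ++ buf ++
      b.filter (fun c => c != 'O') ++ PySem.Chars.join ['#'] ([] :: bs.map fblk) := by
  induction cs with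
  | nil =>
    intro cnt buf b bs hs
    simp only [spl, List.cons.injEq] at hs
    obtain ⟨rfl, rfl⟩ := hs
    simp [runBgo, PySem.Chars.join_singleton]
  | cons c t ih =>
    intro cnt buf b bs hs
    simp only [spl] at hs
    by_cases hc : c = '#'
    · subst hc
      simp only [if_true] at hs
      cases ht : spl t with
      | nil => exact absurd ht (spl_ne_nil t)
      | cons b' bs' =>
        rw [ht] at hs
        obtain ⟨rfl, rfl⟩ := List.cons.injEq .. |>.mp hs
        simp only [runBgo, if_true]
        rw [ih 0 [] b' bs' ht]
        rw [List.map_cons, PySem.Chars.join_cons_cons, join_head_out ['#'] (fblk b') (bs'.map fblk)]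
        simp [fblk]
    · simp only [hc, if_false] at hs
      cases ht : spl t with
      | nil => exact absurd ht (spl_ne_nil t)
      | cons b' bs' =>
        rw [ht] at hs
        simp only [List.modifyHead, List.cons.injEq] at hs
        obtain ⟨rfl, rfl⟩ := hs
        by_cases ho : c = 'O'
        · subst ho
          simp only [runBgo, if_false, if_true, hc]
          rw [ih (cnt + 1) buf b' bs' ht]
          have : ('O' :: b').count 'O' = b'.count 'O' + 1 := by simp [List.count_cons]
          rw [this]
          have : cnt + 1 + b'.count 'O' = cnt + (b'.count 'O' + 1) := by omega
          rw [this]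
          simp
        · simp only [runBgo, hc, ho, if_false]
          rw [ih cnt (buf ++ [c]) b' bs' ht]
          simp [ho]

-- ===== VERDICT (by name: the statement is the Claim_ definition above) =====
theorem run_cyle_spec : Claim_equal_run_cyle := by
  intro seq _
  unfold Spec_run_cyle run_cyle run_cyle_alt
  dsimp only
  rw [splitOn_spec]
  have hmap : (spl seq.toList).foldl (fun acc block =>
      acc ++ [List.replicate (PySem.Chars.count block ['O']) 'O' ++
        PySem.Chars.replace block ['O'] []]) [] = (spl seq.toList).map fblk := by
    rw [PySem.List.foldl_append_singleton_eq_map]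
    apply List.map_congr_left
    intro b _
    simp [fblk, count_spec, replace_spec]
  rw [hmap]
  cases hs : spl seq.toList with
  | nil => exact absurd hs (spl_ne_nil seq.toList)
  | cons b bs =>
    rw [List.map_cons, join_head_out ['#'] (fblk b) (bs.map fblk),
      runBgo_spec seq.toList 0 [] b bs hs]
    simp [fblk]
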